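-- pv_equiv track=rewrite | github.com/hassangulzar1/Learning-DSA | java/8- recursion/problem solving/easy/Q22.py | removeDef
-- ===== SOURCE A (Python) =====
-- def removeDef(s):
--     if len(s) < 2:
--         return s
--
--     temp = s[0]
--     if temp != s[1]:
--         return temp + removeDef(s[1:])
--     else:
--         return removeDef(s[1:])
-- ===== SOURCE B (Python) =====
-- def removeDef(s):
--     out = []
--     i = 0
--     n = len(s)
--     while i < n:
--         c = s[i]
--         out.append(c)
--         i += 1
--         while i < n and s[i] == c:
--             i += 1
--     return ''.join(out)
-- ===== Notes on version B (the rewrite author's own statement) =====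
-- stated objective: faster
-- what changed: Replaced A's per-character recursion (which slices s[1:] at every step and compares each char to its next neighbor) with a single iterative pass that emits the first char of each maximal run and skips the rest of the run, joining at the end.
import Mathlib
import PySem

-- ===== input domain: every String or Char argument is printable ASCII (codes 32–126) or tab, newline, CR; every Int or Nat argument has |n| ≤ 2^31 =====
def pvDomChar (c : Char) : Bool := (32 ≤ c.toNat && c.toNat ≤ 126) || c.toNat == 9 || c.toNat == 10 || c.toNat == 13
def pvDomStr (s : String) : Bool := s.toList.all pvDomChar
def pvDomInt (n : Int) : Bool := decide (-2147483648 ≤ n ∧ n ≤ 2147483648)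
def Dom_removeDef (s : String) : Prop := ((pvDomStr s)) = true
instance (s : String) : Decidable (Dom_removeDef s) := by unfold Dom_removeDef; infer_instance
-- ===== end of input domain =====

-- B replaces A's quadratic slice-and-recurse neighbor comparison with a single linear
-- pass that keeps the first character of each maximal run and skips the rest.

-- ===== PORT A =====
-- A's recursion over the characters: len(s) < 2 → s; compare s[0] with s[1], recurse on s[1:]
def removeDefListA : List Char → List Char
  | [] => []
  | [c] => [c]
  | a :: b :: t => if a ≠ b then a :: removeDefListA (b :: t) else removeDefListA (b :: t)

def removeDef (s : String) : String := String.ofList (removeDefListA s.toList)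

-- ===== PORT B =====
-- B's run-skipping pass: emit the head character, skip the rest of its run, continue.
def removeDefListB : List Char → List Char
  | [] => []
  | a :: t => a :: removeDefListB (t.dropWhile (· == a))
termination_by l => l.length
decreasing_by
  simpa using Nat.lt_succ_of_le (List.length_dropWhile_le _ _)

def removeDef_alt (s : String) : String := String.ofList (removeDefListB s.toList)

-- ===== PRECONDITION & SPEC =====
def Spec_removeDef (s : String) (out : String) : Prop := out = removeDef_alt s
instance (s : String) (out : String) : Decidable (Spec_removeDef s out) := by unfold Spec_removeDef; infer_instance

-- ===== CLAIM (what is proved, stated in full; the proofs are below) =====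
def Claim_equal_removeDef : Prop := ∀ (s : String), Dom_removeDef s → Spec_removeDef s (removeDef s)

-- ===== LEMMAS AND PROOFS =====
theorem removeDefListA_cons (a : Char) (t : List Char) :
    removeDefListA (a :: t) = a :: removeDefListA (t.dropWhile (· == a)) := by
  induction t with
  | nil => simp [removeDefListA]
  | cons b t' ih =>
    by_cases h : a = b
    · subst h
      simpa [removeDefListA, List.dropWhile] using ih
    · have hb : (b == a) = false := by simp [Ne.symm h]
      simp [removeDefListA, h, List.dropWhile, hb]

theorem removeDefList_eq : ∀ (n : ℕ) (l : List Char), l.length ≤ n →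
    removeDefListA l = removeDefListB l := by
  intro n
  induction n with
  | zero =>
    intro l hl
    simp only [Nat.le_zero, List.length_eq_zero_iff] at hl
    subst hl; simp [removeDefListA, removeDefListB]
  | succ n ih =>
    intro l hl
    cases l with
    | nil => simp [removeDefListA, removeDefListB]
    | cons a t =>
      rw [removeDefListA_cons]
      rw [show removeDefListB (a :: t) = a :: removeDefListB (t.dropWhile (· == a)) from by
        simp [removeDefListB]]
      have : (t.dropWhile (· == a)).length ≤ n := by
        have := List.length_dropWhile_le (· == a) t
        simp only [List.length_cons, Nat.succ_le_succ_iff] at hl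
        omega
      rw [ih _ this]

-- ===== VERDICT (by name: the statement is the Claim_ definition above) =====
theorem removeDef_spec : Claim_equal_removeDef := by
  intro s _
  unfold Spec_removeDef removeDef removeDef_alt
  rw [removeDefList_eq s.toList.length s.toList le_rfl]
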